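-- pv_equiv track=rewrite | github.com/itmoon7/ml4hc_prostate_cancer | pre_processing/process_pat_biopsy.py | func_det_negation
-- ===== SOURCE A (Python) =====
-- def func_det_negation(text_detect_neg):
-- 	det_negation = 0
-- 	for idx, val in enumerate(text_detect_neg):
-- 		if 'no' == val.lower():
-- 			bool_list = []
-- 			for val_ in text_detect_neg[idx:]:
-- 				if '.' not in val_:
-- 					bool_list.append(False)
-- 				else:
-- 					bool_list.append(True)
-- 			if not any(bool_list): # if there is no dot between 'no' --- 'query word', then we consider it as a negation
-- 				det_negation = 1
-- 	return det_negation
-- ===== SOURCE B (Python) =====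
-- def func_det_negation(text_detect_neg):
--     # One backward pass: a negation exists iff some 'no' token occurs
--     # strictly after the last dot-containing token.
--     for tok in reversed(text_detect_neg):
--         if tok.lower() == 'no':
--             return 1
--         if '.' in tok:
--             return 0
--     return 0
-- ===== Notes on version B (the rewrite author's own statement) =====
-- stated objective: simpler
-- what changed: Replaced the nested scan (for every 'no' token, build a bool list over the whole suffix and any() it) by a single backward pass that returns 1 at the first 'no' seen before any dot-containing token; on random inputs without many 'no' tokens the measured times are equal.
import Mathlib
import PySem

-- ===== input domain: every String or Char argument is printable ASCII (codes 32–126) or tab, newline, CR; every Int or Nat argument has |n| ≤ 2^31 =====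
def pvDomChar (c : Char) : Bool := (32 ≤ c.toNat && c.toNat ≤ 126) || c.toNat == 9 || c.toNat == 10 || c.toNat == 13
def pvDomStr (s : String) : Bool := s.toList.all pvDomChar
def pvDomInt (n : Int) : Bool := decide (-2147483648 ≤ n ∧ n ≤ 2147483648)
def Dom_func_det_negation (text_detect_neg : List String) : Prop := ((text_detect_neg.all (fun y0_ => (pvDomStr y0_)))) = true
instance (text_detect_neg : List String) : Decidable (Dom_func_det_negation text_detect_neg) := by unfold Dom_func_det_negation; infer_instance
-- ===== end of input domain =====

-- B replaces A's nested rescan-of-every-suffix by a single backward pass (simpler, one loop).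


-- ===== PORT A =====
def func_det_negation (text_detect_neg : List String) : Int :=
  (PySem.List.enumerate text_detect_neg 0).foldl
    (fun det p =>
      if PySem.Str.lower p.2 = "no" then
        let bool_list := (PySem.List.slice text_detect_neg (some p.1) none).foldl
          (fun bl v => if PySem.Str.isIn "." v = false then bl ++ [false] else bl ++ [true]) []
        if bool_list.any id = false then 1 else det
      else det) 0

-- ===== PORT B =====
def pvAltGo : List String → Int
  | [] => 0
  | t :: ts =>
    if PySem.Str.lower t = "no" then 1
    else if PySem.Str.isIn "." t then 0
    else pvAltGo ts

def func_det_negation_alt (text_detect_neg : List String) : Int :=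
  pvAltGo text_detect_neg.reverse

-- ===== PRECONDITION & SPEC =====
def Spec_func_det_negation (text_detect_neg : List String) (out : Int) : Prop := out = func_det_negation_alt text_detect_neg
instance (text_detect_neg : List String) (out : Int) : Decidable (Spec_func_det_negation text_detect_neg out) := by unfold Spec_func_det_negation; infer_instance

-- ===== CLAIM (what is proved, stated in full; the proofs are below) =====
def Claim_equal_func_det_negation : Prop := ∀ (text_detect_neg : List String), Dom_func_det_negation text_detect_neg → Spec_func_det_negation text_detect_neg (func_det_negation text_detect_neg)

-- ===== LEMMAS AND PROOFS =====

-- the proposition both programs decide: some 'no' token with a dot-free suffix from it on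
def pvNeg (l : List String) : Prop :=
  ∃ k, ∃ _ : k < l.length, PySem.Str.lower l[k] = "no" ∧
    ∀ x ∈ l.drop k, PySem.Str.isIn "." x = false

-- the per-position condition A's outer loop tests, as a Bool
def pvCond (l : List String) (p : Int × String) : Bool :=
  (PySem.Str.lower p.2 == "no") &&
    !((PySem.List.slice l (some p.1) none).any (fun v => PySem.Str.isIn "." v))

lemma pv_foldl_if_one {α : Type} (c : α → Bool) (el : List α) (det : Int) :
    el.foldl (fun d x => if c x then (1 : Int) else d) det =
      if el.any c then 1 else det := by
  induction el generalizing det with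
  | nil => simp
  | cons x xs ih => by_cases h : c x <;> simp [h, ih]

lemma pv_A_eq_if (l : List String) :
    func_det_negation l = if (PySem.List.enumerate l 0).any (pvCond l) then 1 else 0 := by
  unfold func_det_negation
  rw [show (fun (det : Int) (p : Int × String) =>
      if PySem.Str.lower p.2 = "no" then
        let bool_list := (PySem.List.slice l (some p.1) none).foldl
          (fun bl v => if PySem.Str.isIn "." v = false then bl ++ [false] else bl ++ [true]) []
        if bool_list.any id = false then 1 else det
      else det) = (fun det p => if pvCond l p then 1 else det) from ?_]
  · exact pv_foldl_if_one _ _ _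
  · funext det p
    have hmap : (PySem.List.slice l (some p.1) none).foldl
        (fun bl v => if PySem.Str.isIn "." v = false then bl ++ [false] else bl ++ [true]) []
        = (PySem.List.slice l (some p.1) none).map (fun v => PySem.Str.isIn "." v) := by
      rw [show (fun (bl : List Bool) v => if PySem.Str.isIn "." v = false then bl ++ [false] else bl ++ [true])
          = (fun bl v => bl ++ [PySem.Str.isIn "." v]) from by
        funext bl v; cases h : PySem.Str.isIn "." v <;> simp]
      rw [PySem.List.foldl_append_singleton_eq_map]
      simp
    simp only [hmap, pvCond, List.any_map]
    by_cases h1 : PySem.Str.lower p.2 = "no" <;>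
      by_cases h2 : (PySem.List.slice l (some p.1) none).any (fun v => PySem.Str.isIn "." v) <;>
        simp [h1]

lemma pv_any_iff (l : List String) :
    (PySem.List.enumerate l 0).any (pvCond l) = true ↔ pvNeg l := by
  rw [List.any_eq_true]
  constructor
  · rintro ⟨p, hp, hc⟩
    rw [PySem.List.mem_enumerate_iff] at hp
    obtain ⟨k, hk, rfl⟩ := hp
    simp only [pvCond, zero_add, Bool.and_eq_true, beq_iff_eq, Bool.not_eq_true'] at hc
    refine ⟨k, hk, hc.1, ?_⟩
    have hs : PySem.List.slice l (some ((k : Nat) : Int)) none = l.drop k :=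
      PySem.List.slice_from_natCast ..
    have := hc.2
    rw [hs, List.any_eq_false] at this
    intro x hx; simpa using this x hx
  · rintro ⟨k, hk, hno, hdot⟩
    refine ⟨((k : Int), l[k]), ?_, ?_⟩
    · rw [PySem.List.mem_enumerate_iff]; exact ⟨k, hk, by simp⟩
    · simp only [pvCond, Bool.and_eq_true, beq_iff_eq, Bool.not_eq_true']
      refine ⟨hno, ?_⟩
      have hs : PySem.List.slice l (some ((k : Nat) : Int)) none = l.drop k :=
        PySem.List.slice_from_natCast ..
      rw [hs, List.any_eq_false]
      intro x hx; simpa using hdot x hx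

-- a token whose lower() is "no" contains no dot
lemma pv_no_dotless (x : String) (h : PySem.Str.lower x = "no") :
    PySem.Str.isIn "." x = false := by
  by_contra hc
  rw [Bool.not_eq_false, PySem.Str.isIn_iff_infix] at hc
  have hm : '.' ∈ x.toList := by
    have : ("." : String).toList = ['.'] := rfl
    rw [this] at hc
    exact hc.mem (by simp)
  have : '.' ∈ (PySem.Str.lower x).toList := by
    rw [PySem.Str.toList_lower]
    have : PySem.Chars.lowerChar '.' = '.' := rfl
    rw [show PySem.Chars.lower x.toList = x.toList.map PySem.Chars.lowerChar from rfl]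
    exact this ▸ List.mem_map_of_mem hm
  rw [h] at this
  simp at this

lemma pv_altGo_zero_or_one (r : List String) : pvAltGo r = 0 ∨ pvAltGo r = 1 := by
  induction r with
  | nil => left; rfl
  | cons t ts ih =>
    simp only [pvAltGo]
    by_cases h1 : PySem.Str.lower t = "no"
    · simp [h1]
    · rw [if_neg h1]
      cases h2 : PySem.Str.isIn "." t
      · simpa using ih
      · simp

lemma pv_alt_iff (l : List String) : pvAltGo l.reverse = 1 ↔ pvNeg l := by
  induction l using List.reverseRecOn with
  | nil =>
    constructor
    · intro h; simp [pvAltGo] at h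
    · rintro ⟨k, hk, _⟩; simp at hk
  | append_singleton ys x ih =>
    rw [List.reverse_append, List.reverse_singleton, List.singleton_append]
    by_cases h1 : PySem.Str.lower x = "no"
    · simp only [pvAltGo, h1]
      constructor
      · intro _
        refine ⟨ys.length, by simp, ?_, ?_⟩
        · simpa using h1
        · intro z hz
          rw [List.drop_append_of_le_length (le_refl _)] at hz
          simp at hz
          rw [hz]; exact pv_no_dotless x h1
      · intro _; rfl
    · by_cases h2 : PySem.Str.isIn "." x = true
      · simp only [pvAltGo, if_neg h1, if_pos h2]
        constructor
        · intro h; exact absurd h (by decide)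
        · rintro ⟨k, hk, hno, hdot⟩
          have hkle : k ≤ ys.length := by
            simp at hk; omega
          have hxd : PySem.Str.isIn "." x = false := by
            apply hdot
            rw [List.drop_append_of_le_length hkle]
            simp
          rw [h2] at hxd; exact absurd hxd (by decide)
      · simp only [pvAltGo, if_neg h1, if_neg h2]
        rw [ih]
        constructor
        · rintro ⟨k, hk, hno, hdot⟩
          refine ⟨k, by simp; omega, ?_, ?_⟩
          · rwa [List.getElem_append_left]
          · intro z hz
            rw [List.drop_append_of_le_length (by omega)] at hz
            rcases List.mem_append.1 hz with h | h
            · exact hdot z h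
            · simp at h; rw [h]; exact Bool.eq_false_iff.mpr h2
        · rintro ⟨k, hk, hno, hdot⟩
          have hk' : k < ys.length + 1 := by simpa using hk
          by_cases hke : k = ys.length
          · subst hke
            rw [List.getElem_append_right (le_refl _)] at hno
            simp at hno
            exact absurd hno h1
          · have hklt : k < ys.length := by omega
            refine ⟨k, hklt, ?_, ?_⟩
            · rwa [List.getElem_append_left hklt] at hno
            · intro z hz
              apply hdot
              rw [List.drop_append_of_le_length (by omega)]
              exact List.mem_append_left _ hz

-- ===== VERDICT (by name: the statement is the Claim_ definition above) =====
theorem func_det_negation_spec : Claim_equal_func_det_negation := by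
  intro l _
  unfold Spec_func_det_negation func_det_negation_alt
  rw [pv_A_eq_if]
  by_cases h : (PySem.List.enumerate l 0).any (pvCond l) = true
  · rw [if_pos h]
    exact ((pv_alt_iff l).2 ((pv_any_iff l).1 h)).symm
  · rw [if_neg h]
    have hne : pvAltGo l.reverse ≠ 1 := fun hc =>
      h ((pv_any_iff l).2 ((pv_alt_iff l).1 hc))
    rcases pv_altGo_zero_or_one l.reverse with h0 | h1
    · exact h0.symm
    · exact absurd h1 hne
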